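-- pv_equiv track=rewrite | github.com/ShivaSankeerth/Yelp-RecommendationSystem-SparkRDD | src/utils.py | havecommon_2
-- ===== SOURCE A (Python) =====
-- def havecommon_2(x,y):
--     item_list_1=x.keys()
--     item_list_2=y.keys()
--     i=0
--     for ele in item_list_1:
--         if ele in item_list_2:
--             i+=1
--         if i==2:
--             return True
--     return False
-- ===== SOURCE B (Python) =====
-- def havecommon_2(x, y):
--     return len(x.keys() & y.keys()) >= 2
-- ===== Notes on version B (the rewrite author's own statement) =====
-- stated objective: idiomatic
-- what changed: Replaced the counter loop with early exit by building the key intersection with dict-view set intersection and testing its size.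
import Mathlib
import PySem

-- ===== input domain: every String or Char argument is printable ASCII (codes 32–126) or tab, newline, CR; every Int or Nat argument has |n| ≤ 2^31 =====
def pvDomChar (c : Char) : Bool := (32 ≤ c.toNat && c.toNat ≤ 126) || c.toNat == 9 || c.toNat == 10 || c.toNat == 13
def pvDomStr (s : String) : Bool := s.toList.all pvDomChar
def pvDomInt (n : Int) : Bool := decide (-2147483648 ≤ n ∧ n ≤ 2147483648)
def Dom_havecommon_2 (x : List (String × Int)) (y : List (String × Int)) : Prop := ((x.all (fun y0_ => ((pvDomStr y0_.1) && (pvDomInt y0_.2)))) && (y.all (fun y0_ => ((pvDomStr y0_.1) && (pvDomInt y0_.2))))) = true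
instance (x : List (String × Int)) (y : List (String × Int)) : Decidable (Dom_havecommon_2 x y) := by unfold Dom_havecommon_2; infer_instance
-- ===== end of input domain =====

-- B replaces A's scan-with-counter-and-early-exit by building the key intersection and testing its size (idiomatic).

-- ===== PORT A =====
-- the 'for ele in item_list_1' loop with counter i and early 'return True'
def havecommon_2_loop (il2 : List String) : List String → Int → Bool
  | [], _ => false
  | ele :: rest, i =>
    let i' := if il2.contains ele then i + 1 else i
    if i' == 2 then true else havecommon_2_loop il2 rest i'

def havecommon_2 (x : List (String × Int)) (y : List (String × Int)) : Bool :=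
  let item_list_1 := (PySem.Dict.ofList x).keys
  let item_list_2 := (PySem.Dict.ofList y).keys
  havecommon_2_loop item_list_2 item_list_1 0

-- ===== PORT B =====
-- len(x.keys() & y.keys()) >= 2  (set intersection of the key views, then size test)
def havecommon_2_alt (x : List (String × Int)) (y : List (String × Int)) : Bool :=
  let common := ((PySem.Dict.ofList x).keys).filter (fun k => ((PySem.Dict.ofList y).keys).contains k)
  decide (common.length ≥ 2)

-- ===== PRECONDITION & SPEC =====
def Spec_havecommon_2 (x : List (String × Int)) (y : List (String × Int)) (out : Bool) : Prop := out = havecommon_2_alt x y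
instance (x : List (String × Int)) (y : List (String × Int)) (out : Bool) : Decidable (Spec_havecommon_2 x y out) := by unfold Spec_havecommon_2; infer_instance

-- ===== CLAIM (what is proved, stated in full; the proofs are below) =====
def Claim_equal_havecommon_2 : Prop := ∀ (x : List (String × Int)) (y : List (String × Int)), Dom_havecommon_2 x y → Spec_havecommon_2 x y (havecommon_2 x y)

-- ===== LEMMAS AND PROOFS =====
theorem havecommon_2_loop_spec (il2 : List String) (ks : List String) (i : Int) (hi : i < 2) :
    havecommon_2_loop il2 ks i = decide (i + (ks.filter (fun k => il2.contains k)).length ≥ 2) := by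
  induction ks generalizing i with
  | nil => simp [havecommon_2_loop]; omega
  | cons ele rest ih =>
    rw [havecommon_2_loop]
    by_cases h : il2.contains ele = true
    · rw [List.filter_cons_of_pos (by simpa using h)]
      simp only [h, if_true]
      by_cases h2 : i + 1 = 2
      · rw [if_pos (by simpa using h2), List.length_cons, eq_comm, decide_eq_true_iff]
        push_cast
        omega
      · rw [if_neg (by simpa using h2), ih (i + 1) (by omega), List.length_cons]
        rw [decide_eq_decide]
        push_cast
        omega
    · rw [List.filter_cons_of_neg (by simpa using h), if_neg h,
        if_neg (by simpa using (by omega : ¬ i = 2))]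
      exact ih i hi

-- ===== VERDICT (by name: the statement is the Claim_ definition above) =====
theorem havecommon_2_spec : Claim_equal_havecommon_2 := by
  intro x y _
  unfold Spec_havecommon_2 havecommon_2 havecommon_2_alt
  simp only []
  rw [havecommon_2_loop_spec _ _ _ (by omega)]
  simp
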